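-- pv_equiv track=rewrite | github.com/MrT3313/AdventOfCode | 2024/Day6/python/2024-Day6-Part1.py | countVisitedCells
-- ===== SOURCE A (Python) =====
-- def countVisitedCells(matrix):
--     count = 0
--     visited_chars = {'X', '^', '>', 'v', '<'}
--
--     # Loop through each cell in the matrix
--     for row in matrix:
--         for cell in row:
--             if cell in visited_chars:
--                 count += 1
--
--     return count
-- ===== SOURCE B (Python) =====
-- def countVisitedCells(matrix):
--     # Build a frequency table of every cell value, then sum the five marker keys.
--     counts = {}
--     for row in matrix:
--         for cell in row:
--             counts[cell] = counts.get(cell, 0) + 1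
--     return sum(counts.get(ch, 0) for ch in ('X', '^', '>', 'v', '<'))
-- ===== Notes on version B (the rewrite author's own statement) =====
-- stated objective: alternative
-- what changed: B builds a full frequency table (counter dict) of all cell values in one pass and then sums the counts of the five marker keys in a separate small pass, instead of A's per-cell membership test against the marker set.
import Mathlib
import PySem

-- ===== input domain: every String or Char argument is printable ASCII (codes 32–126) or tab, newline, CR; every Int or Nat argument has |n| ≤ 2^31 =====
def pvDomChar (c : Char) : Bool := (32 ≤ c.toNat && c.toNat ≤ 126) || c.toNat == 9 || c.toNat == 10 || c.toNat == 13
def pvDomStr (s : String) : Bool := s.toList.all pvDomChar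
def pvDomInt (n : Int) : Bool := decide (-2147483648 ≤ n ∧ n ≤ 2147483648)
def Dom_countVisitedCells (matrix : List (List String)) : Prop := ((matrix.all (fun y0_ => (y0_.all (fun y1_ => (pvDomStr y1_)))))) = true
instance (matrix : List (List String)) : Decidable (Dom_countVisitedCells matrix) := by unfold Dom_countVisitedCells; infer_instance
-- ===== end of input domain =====

-- B replaces A's per-cell membership test by building a full frequency table of the
-- cell values and then summing the counts of the five marker keys (objective: alternative).

-- ===== PORT A =====
-- visited_chars = {'X', '^', '>', 'v', '<'}
def pvVisitedChars : PySem.Set String := PySem.Set.ofList ["X", "^", ">", "v", "<"]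

def countVisitedCells (matrix : List (List String)) : Int :=
  matrix.foldl (fun count row =>
    row.foldl (fun count cell =>
      if cell ∈ pvVisitedChars then count + 1 else count) count) 0

-- ===== PORT B =====
def countVisitedCells_alt (matrix : List (List String)) : Int :=
  let counts : PySem.Dict String Int :=
    matrix.foldl (fun d row =>
      row.foldl (fun d cell => d.insert cell (d.getD cell 0 + 1)) d) PySem.Dict.empty
  (["X", "^", ">", "v", "<"].map (fun ch => counts.getD ch 0)).sum

-- ===== PRECONDITION & SPEC =====
def Spec_countVisitedCells (matrix : List (List String)) (out : Int) : Prop := out = countVisitedCells_alt matrix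
instance (matrix : List (List String)) (out : Int) : Decidable (Spec_countVisitedCells matrix out) := by unfold Spec_countVisitedCells; infer_instance

-- ===== CLAIM (what is proved, stated in full; the proofs are below) =====
def Claim_equal_countVisitedCells : Prop := ∀ (matrix : List (List String)), Dom_countVisitedCells matrix → Spec_countVisitedCells matrix (countVisitedCells matrix)

-- ===== LEMMAS AND PROOFS =====

-- A's nested fold is the fold over the flattened cell list.
theorem pv_A_flatten (matrix : List (List String)) :
    countVisitedCells matrix =
      matrix.flatten.foldl (fun count cell =>
        if cell ∈ pvVisitedChars then count + 1 else count) 0 := by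
  simp [countVisitedCells, List.foldl_flatten]

-- B's nested fold is the counter fold over the flattened cell list.
theorem pv_B_flatten (matrix : List (List String)) :
    countVisitedCells_alt matrix =
      (["X", "^", ">", "v", "<"].map (fun ch =>
        (matrix.flatten.foldl (fun d cell => d.insert cell (d.getD cell 0 + 1))
          (PySem.Dict.empty : PySem.Dict String Int)).getD ch 0)).sum := by
  simp [countVisitedCells_alt, List.foldl_flatten]

-- The counting fold distributes over its initial accumulator.
theorem pv_foldl_shift (xs : List String) (c : Int) :
    xs.foldl (fun count cell => if cell ∈ pvVisitedChars then count + 1 else count) c =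
      c + xs.foldl (fun count cell => if cell ∈ pvVisitedChars then count + 1 else count) 0 := by
  induction xs generalizing c with
  | nil => simp
  | cons y ys ihy =>
    simp only [List.foldl_cons]
    rw [ihy, ihy (if y ∈ pvVisitedChars then (0:Int) + 1 else 0)]
    split <;> ring

-- The membership-counting fold equals the sum of occurrence counts of the markers.
theorem pv_count_sum (l : List String) :
    l.foldl (fun count cell => if cell ∈ pvVisitedChars then count + 1 else count) (0 : Int) =
      (["X", "^", ">", "v", "<"].map (fun ch => (l.count ch : Int))).sum := by
  induction l with
  | nil => rfl
  | cons x xs ih =>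
    rw [List.foldl_cons, pv_foldl_shift, ih]
    by_cases hx : x ∈ pvVisitedChars
    · have hx' : x = "X" ∨ x = "^" ∨ x = ">" ∨ x = "v" ∨ x = "<" := by
        simpa [pvVisitedChars, PySem.Set.ofList] using hx
      rcases hx' with h | h | h | h | h <;> subst h <;>
        simp [if_pos hx, List.count_cons] <;> ring
    · have hne : ∀ ch ∈ ["X", "^", ">", "v", "<"], ¬ x = ch := by
        intro ch hch hxe
        exact hx (by subst hxe; fin_cases hch <;> decide)
      simp only [if_neg hx, zero_add]
      congr 1
      apply List.map_congr_left
      intro ch hch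
      rw [List.count_cons]
      simp [beq_iff_eq, hne ch hch]

-- ===== VERDICT (by name: the statement is the Claim_ definition above) =====
theorem countVisitedCells_spec : Claim_equal_countVisitedCells := by
  intro matrix _
  unfold Spec_countVisitedCells
  rw [pv_A_flatten, pv_B_flatten, pv_count_sum]
  congr 1
  apply List.map_congr_left
  intro ch _
  rw [PySem.Dict.getD_foldl_insert_add_one]
  simp
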